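-- pv_equiv track=rewrite | github.com/kr2020lbh/Problem | PROGRAMMERS/2020 KAKAO BLINE RECRUITMENT/괄호변환.py | recur
-- ===== SOURCE A (Python) =====
-- l = '('
--
-- r = ')'
--
-- def check_balance(arr):
--     l_cnt=r_cnt=0
--     for element in arr:
--         if element == l:
--             l_cnt+=1
--         if element == r:
--             r_cnt+=1
--     if l_cnt==r_cnt:
--         return True
--     return False
--
-- def check_alright(arr):
--     S=[]
--     for element in arr:
--         if element == l:
--             S.append(l)
--         if element == r:
--             if not S:
--                 return False
--             if l!=S.pop():
--                 return False
--     if S: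
--         return False
--     return True
--
-- def recur(w):
--     for i in range(1, len(w) + 1):
--         if check_balance(w[0:i]) and check_balance(w[i::]):
--             u = w[0:i]
--             v = w[i::]
--             if check_alright(u):
--                 u += recur(v)
--                 return u
--             else:
--                 return '(' + recur(v) + ')' + refine_u(u)
--     else:
--         return ''
--
-- def refine_u(w):
--     w = list(w)
--     ans = w[1:len(w) - 1:1]
--     for i in range(len(ans)):
--         if ans[i] == l:
--             ans[i] = r
--         else:
--             ans[i] = l
--     return ''.join(ans)
-- ===== SOURCE B (Python) =====
-- def recur(w):
--     if w.count('(') != w.count(')'):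
--         return ''
--     n = len(w)
--     prefix = []
--     suffix = []
--     pos = 0
--     while pos < n:
--         bal = 0
--         neg = False
--         cut = pos
--         for i in range(pos, n):
--             c = w[i]
--             if c == '(':
--                 bal += 1
--             elif c == ')':
--                 bal -= 1
--                 if bal < 0:
--                     neg = True
--             if bal == 0:
--                 cut = i + 1
--                 break
--         if not neg:
--             prefix.append(w[pos:cut])
--         else:
--             prefix.append('(')
--             suffix.append(')' + ''.join(')' if c == '(' else '(' for c in w[pos + 1:cut - 1]))
--         pos = cut
--     return ''.join(prefix) + ''.join(reversed(suffix))
-- ===== Notes on version B (the rewrite author's own statement) =====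
-- stated objective: faster
-- what changed: A searches for the split point by re-scanning every prefix and suffix with check_balance for each candidate i (quadratic per recursion level); B checks balancedness once with two count() calls and finds the split point and the dipped-below-zero flag in a single running-balance loop that breaks at the first return to zero (linear per level).
import Mathlib
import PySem

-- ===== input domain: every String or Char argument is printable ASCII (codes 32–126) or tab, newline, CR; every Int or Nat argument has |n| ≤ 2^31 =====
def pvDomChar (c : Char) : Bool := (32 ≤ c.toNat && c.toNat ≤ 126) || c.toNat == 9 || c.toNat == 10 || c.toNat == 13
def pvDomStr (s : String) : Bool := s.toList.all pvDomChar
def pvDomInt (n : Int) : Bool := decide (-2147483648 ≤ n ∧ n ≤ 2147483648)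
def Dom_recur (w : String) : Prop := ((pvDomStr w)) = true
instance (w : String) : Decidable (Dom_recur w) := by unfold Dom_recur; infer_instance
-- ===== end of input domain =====

-- B replaces A's quadratic, recursive split search (re-scanning every prefix/suffix per
-- candidate) by an iterative loop: a count-based balance check plus one running-balance
-- pass that stops at the first balanced prefix; objective: faster (measured by the check).

-- ===== PORT A =====
-- check_balance: count '(' and ')' in a loop, then compare
def check_balance (arr : List Char) : Bool :=
  let p := arr.foldl (fun (p : Nat × Nat) e =>
      let p := if e = '(' then (p.1 + 1, p.2) else p
      if e = ')' then (p.1, p.2 + 1) else p) (0, 0)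
  p.1 == p.2

-- check_alright's loop with stack S; Python's early 'return False' becomes result false
def check_alright_loop : List Char → List Char → Bool
  | [], S => S.isEmpty
  | e :: rest, S =>
    let S := if e = '(' then S ++ ['('] else S   -- S.append(l)
    if e = ')' then
      match S.getLast? with                      -- if not S: return False / S.pop()
      | none => false
      | some t => if ('(' : Char) ≠ t then false else check_alright_loop rest S.dropLast
    else check_alright_loop rest S

def check_alright (arr : List Char) : Bool := check_alright_loop arr []

-- refine_u's in-place index loop flipping each char of ans
def refineLoop : List Char → List Char
  | [] => []
  | c :: rest => (if c = '(' then ')' else '(') :: refineLoop rest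

def refine_u (w : List Char) : List Char :=
  let ans := PySem.List.slice w (some 1) (some ((w.length : Int) - 1))   -- w[1:len(w)-1:1]
  refineLoop ans

-- the 'for i in range(1, len(w)+1)' search for the first valid split
def findLoop (w : List Char) (i : Nat) : Option Nat :=
  if i ≤ w.length then
    if check_balance (PySem.List.slice w (some 0) (some (i : Int))) &&
       check_balance (PySem.List.slice w (some (i : Int)) none) then some i
    else findLoop w (i + 1)
  else none
termination_by w.length + 1 - i

-- needed by recurCore's termination proof
theorem findLoop_bounds (w : List Char) : ∀ j i, findLoop w j = some i → j ≤ i ∧ i ≤ w.length := by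
  intro j
  have H : ∀ f j, w.length + 1 - j ≤ f → ∀ i, findLoop w j = some i → j ≤ i ∧ i ≤ w.length := by
    intro f
    induction f with
    | zero =>
      intro j hf i h
      rw [findLoop, if_neg (by omega)] at h
      exact absurd h (by simp)
    | succ n ih =>
      intro j hf i h
      rw [findLoop] at h
      by_cases hj : j ≤ w.length
      · rw [if_pos hj] at h
        split at h
        · cases h; omega
        · have := ih (j + 1) (by omega) i h
          omega
      · rw [if_neg hj] at h
        exact absurd h (by simp)
  exact H (w.length + 1 - j) j (le_refl _)

def recurCore (w : List Char) : List Char :=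
  match h : findLoop w 1 with
  | none => []                                          -- for-else: return ''
  | some i =>
    let u := PySem.List.slice w (some 0) (some (i : Int))
    let v := PySem.List.slice w (some (i : Int)) none
    if check_alright u then u ++ recurCore v
    else '(' :: (recurCore v ++ ')' :: refine_u u)
termination_by w.length
decreasing_by
  all_goals
    have hb := findLoop_bounds w 1 i h
    simp [PySem.List.slice_from_natCast]
    omega

def recur (w : String) : String := String.mk (recurCore w.toList)

-- ===== PORT B =====
-- w.count('(') != w.count(')')  (List.count is exact for a single-char needle)
-- then one pass with a running balance that BREAKS at the first index where it returns to 0,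
-- also recording whether the balance dipped below 0 before that
def scanB2 : List Char → Int → Bool → Nat → Bool × Nat
  | [], _, neg, _ => (neg, 0)
  | c :: rest, bal, neg, i =>
    let p : Int × Bool :=
      if c = '(' then (bal + 1, neg)
      else if c = ')' then (bal - 1, if bal - 1 < 0 then true else neg)
      else (bal, neg)
    if p.1 = 0 then (p.2, i + 1) else scanB2 rest p.1 p.2 (i + 1)

-- the while-loop over a moving index pos: prefix chunks appended to pre, wrapper tails pushed on suf;
-- the inner for-loop over range(pos, n) is scanB2 on w.drop pos with the absolute index counter
def bLoop2 (w : List Char) (pos : Nat) (pre : List Char) (suf : List (List Char)) : List Char :=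
  if hlt : pos < w.length then
    match hs : scanB2 (w.drop pos) 0 false pos with
    | (neg, cut) =>
      if hcut : pos < cut then
        -- w[pos:cut] and w[pos+1:cut-1] as Python slices
        if !neg then
          bLoop2 w cut (pre ++ PySem.List.slice w (some (pos : Int)) (some (cut : Int))) suf
        else
          bLoop2 w cut (pre ++ ['('])
            (suf ++ [')' :: (PySem.List.slice w (some ((pos + 1 : Nat) : Int))
              (some ((cut : Int) - 1))).map (fun c => if c = '(' then ')' else '(')])
      else pre ++ suf.reverse.flatten
        -- ^ totality guard: with the top-level balance guard the inner loop always breaks past pos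
  else pre ++ suf.reverse.flatten
termination_by w.length - pos
decreasing_by all_goals omega

def recur_alt (w : String) : String :=
  String.mk (if w.toList.count '(' ≠ w.toList.count ')' then [] else bLoop2 w.toList 0 [] [])

-- ===== PRECONDITION & SPEC =====
def Spec_recur (w : String) (out : String) : Prop := out = recur_alt w
instance (w : String) (out : String) : Decidable (Spec_recur w out) := by unfold Spec_recur; infer_instance

-- ===== CLAIM (what is proved, stated in full; the proofs are below) =====
def Claim_equal_recur : Prop := ∀ (w : String), Dom_recur w → Spec_recur w (recur w)

-- ===== LEMMAS AND PROOFS =====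

-- running balance step and prefix balance
def pstep (b : Int) (c : Char) : Int := if c = '(' then b + 1 else if c = ')' then b - 1 else b

def pbal (xs : List Char) : Int := xs.foldl pstep 0

-- spec of B's scan before the cut is found: chars consumed until balance hits 0, and the dip flag
def scanSpec : List Char → Int → Option (Nat × Bool)
  | [], _ => none
  | c :: rest, b =>
    let b' := pstep b c
    if b' = 0 then some (1, false)
    else match scanSpec rest b' with
      | none => none
      | some (k, ng) => some (k + 1, decide (c = ')' ∧ b' < 0) || ng)

-- pure-counter version of check_alright (stack of m '('s ⇝ the Nat m)
def okA : List Char → Nat → Bool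
  | [], m => m == 0
  | c :: rest, m =>
    if c = '(' then okA rest (m + 1)
    else if c = ')' then (match m with | 0 => false | m + 1 => okA rest m)
    else okA rest m

theorem pstep_add (b : Int) (c : Char) : pstep b c = b + pstep 0 c := by
  unfold pstep; split_ifs <;> omega

theorem foldl_pstep_offset (xs : List Char) : ∀ b, xs.foldl pstep b = b + pbal xs := by
  induction xs with
  | nil => intro b; simp [pbal]
  | cons c t ih =>
    intro b
    show List.foldl pstep (pstep b c) t = b + List.foldl pstep 0 (c :: t)
    rw [List.foldl_cons, ih (pstep b c), ih (pstep 0 c), pstep_add b c]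
    ring

theorem pbal_take_drop (w : List Char) (j : Nat) : pbal (w.take j) + pbal (w.drop j) = pbal w := by
  conv_rhs => rw [← List.take_append_drop j w]
  show _ = List.foldl pstep 0 (w.take j ++ w.drop j)
  rw [List.foldl_append, foldl_pstep_offset]
  rfl

theorem pbal_counts (xs : List Char) : pbal xs = (xs.count '(' : Int) - (xs.count ')' : Int) := by
  induction xs with
  | nil => simp [pbal]
  | cons c t ih =>
    have h : pbal (c :: t) = pstep 0 c + pbal t := by
      show List.foldl pstep (pstep 0 c) t = _
      rw [foldl_pstep_offset]
    rw [h, ih]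
    by_cases h1 : c = '(' <;> by_cases h2 : c = ')' <;>
      simp [pstep, List.count_cons, h1, h2] <;> push_cast <;> ring

theorem cb_loop (xs : List Char) : ∀ a b : Nat,
    xs.foldl (fun (p : Nat × Nat) e =>
      let p := if e = '(' then (p.1 + 1, p.2) else p
      if e = ')' then (p.1, p.2 + 1) else p) (a, b) = (a + xs.count '(', b + xs.count ')') := by
  induction xs with
  | nil => intro a b; simp
  | cons c t ih =>
    intro a b
    by_cases h1 : c = '(' <;> by_cases h2 : c = ')' <;>
      simp [List.foldl_cons, h1, h2, ih, List.count_cons] <;> omega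

theorem check_balance_eq (xs : List Char) : check_balance xs = (pbal xs == 0) := by
  unfold check_balance
  rw [cb_loop xs 0 0, pbal_counts]
  by_cases h : xs.count '(' = xs.count ')' <;> simp [h] <;> omega

theorem scanSpec_cons (c : Char) (t : List Char) (b : Int) :
    scanSpec (c :: t) b = (if pstep b c = 0 then some (1, false) else
      match scanSpec t (pstep b c) with
      | none => none
      | some (k, ng) => some (k + 1, decide (c = ')' ∧ pstep b c < 0) || ng)) := rfl

theorem scanB2_cons (c : Char) (t : List Char) (b : Int) (neg : Bool) (i : Nat) :
    scanB2 (c :: t) b neg i =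
      (if pstep b c = 0 then ((if c = ')' ∧ pstep b c < 0 then true else neg), i + 1)
       else scanB2 t (pstep b c) (if c = ')' ∧ pstep b c < 0 then true else neg) (i + 1)) := by
  by_cases h1 : c = '(' <;> by_cases h2 : c = ')' <;>
    simp [scanB2, pstep, h1, h2]

theorem scanSpec_bounds (xs : List Char) : ∀ b k ng, scanSpec xs b = some (k, ng) → 1 ≤ k ∧ k ≤ xs.length := by
  induction xs with
  | nil => intro b k ng h; simp [scanSpec] at h
  | cons c t ih =>
    intro b k ng h
    rw [scanSpec_cons] at h
    by_cases h0 : pstep b c = 0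
    · rw [if_pos h0] at h
      cases h
      simp
    · rw [if_neg h0] at h
      cases hs : scanSpec t (pstep b c) with
      | none => rw [hs] at h; cases h
      | some p =>
        obtain ⟨k', ng'⟩ := p
        rw [hs] at h
        cases h
        obtain ⟨ha, hb2⟩ := ih (pstep b c) k' ng' hs
        simp only [List.length_cons]
        omega

theorem scanSpec_take (xs : List Char) : ∀ b k ng, scanSpec xs b = some (k, ng) →
    (xs.take k).foldl pstep b = 0 := by
  induction xs with
  | nil => intro b k ng h; simp [scanSpec] at h
  | cons c t ih =>
    intro b k ng h
    rw [scanSpec_cons] at h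
    by_cases h0 : pstep b c = 0
    · rw [if_pos h0] at h
      cases h
      simpa using h0
    · rw [if_neg h0] at h
      cases hs : scanSpec t (pstep b c) with
      | none => rw [hs] at h; cases h
      | some p =>
        obtain ⟨k', ng'⟩ := p
        rw [hs] at h
        cases h
        rw [List.take_succ_cons, List.foldl_cons]
        exact ih _ _ _ hs

-- A's split search agrees with scanSpec (when the whole string is balanced)
theorem findLoop_eq_scanSpec (w : List Char) (hb : pbal w = 0) :
    ∀ fuel m, w.length - m ≤ fuel → m ≤ w.length →
      findLoop w (m + 1) = (scanSpec (w.drop m) (pbal (w.take m))).map (fun p => m + p.1) := by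
  intro fuel
  induction fuel with
  | zero =>
    intro m hf hm
    have hm' : m = w.length := by omega
    subst hm'
    rw [List.drop_length, findLoop, if_neg (by omega)]
    rfl
  | succ f ihf =>
    intro m hf hm
    by_cases hml : m = w.length
    · subst hml
      rw [List.drop_length, findLoop, if_neg (by omega)]
      rfl
    · have hlt : m < w.length := by omega
      have hdrop : w.drop m = w[m] :: w.drop (m + 1) := List.drop_eq_getElem_cons hlt
      have htake : w.take (m + 1) = w.take m ++ [w[m]] := by
        rw [List.take_succ, List.getElem?_eq_getElem hlt]
        rfl
      have hb' : pbal (w.take (m + 1)) = pstep (pbal (w.take m)) w[m] := by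
        rw [htake]
        show List.foldl pstep 0 _ = _
        rw [List.foldl_append]
        rfl
      rw [hdrop, scanSpec_cons, ← hb']
      have hsplit := pbal_take_drop w (m + 1)
      by_cases h0 : pbal (w.take (m + 1)) = 0
      · rw [if_pos h0, findLoop, if_pos (by omega : m + 1 ≤ w.length)]
        have c1 : check_balance (PySem.List.slice w (some 0) (some ((m + 1 : Nat) : Int))) = true := by
          rw [PySem.List.slice_zero_start, PySem.List.slice_to_natCast, check_balance_eq, h0]
          rfl
        have c2 : check_balance (PySem.List.slice w (some ((m + 1 : Nat) : Int)) none) = true := by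
          rw [PySem.List.slice_from_natCast, check_balance_eq]
          simp only [beq_iff_eq]
          omega
        rw [if_pos (by rw [c1, c2]; rfl)]
        rfl
      · rw [if_neg h0, findLoop, if_pos (by omega : m + 1 ≤ w.length)]
        have c1 : check_balance (PySem.List.slice w (some 0) (some ((m + 1 : Nat) : Int))) = false := by
          rw [PySem.List.slice_zero_start, PySem.List.slice_to_natCast, check_balance_eq]
          simp only [beq_eq_false_iff_ne, ne_eq]
          exact h0
        rw [if_neg (by rw [c1]; simp)]
        have hrec := ihf (m + 1) (by omega) (by omega)
        rw [hrec]
        cases hss : scanSpec (w.drop (m + 1)) (pbal (w.take (m + 1))) with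
        | none => rfl
        | some p =>
          obtain ⟨k, ng⟩ := p
          simp only [Option.map_some]
          congr 1
          omega

theorem findLoop_none_of_unbalanced (w : List Char) (hb : pbal w ≠ 0) :
    ∀ fuel j, w.length + 1 - j ≤ fuel → findLoop w j = none := by
  intro fuel
  induction fuel with
  | zero => intro j hf; rw [findLoop, if_neg (by omega)]
  | succ f ihf =>
    intro j hf
    rw [findLoop]
    by_cases hj : j ≤ w.length
    · rw [if_pos hj]
      have hsplit := pbal_take_drop w j
      have hc : (check_balance (PySem.List.slice w (some 0) (some (j : Int))) &&
          check_balance (PySem.List.slice w (some (j : Int)) none)) = false := by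
        rw [PySem.List.slice_zero_start, PySem.List.slice_to_natCast,
          PySem.List.slice_from_natCast, check_balance_eq, check_balance_eq]
        by_cases h1 : pbal (w.take j) = 0 <;> simp [h1]
        omega
      rw [if_neg (by rw [hc]; simp)]
      exact ihf (j + 1) (by omega)
    · rw [if_neg hj]

theorem scanB2_of_scanSpec_some (xs : List Char) : ∀ b neg i k ng, scanSpec xs b = some (k, ng) →
    scanB2 xs b neg i = (neg || ng, i + k) := by
  induction xs with
  | nil => intro b neg i k ng h; simp [scanSpec] at h
  | cons c t ih =>
    intro b neg i k ng h
    rw [scanSpec_cons] at h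
    by_cases h0 : pstep b c = 0
    · rw [if_pos h0] at h
      cases h
      rw [scanB2_cons, if_pos h0, if_neg (by simp [h0])]
      simp
    · rw [if_neg h0] at h
      cases hs : scanSpec t (pstep b c) with
      | none => rw [hs] at h; cases h
      | some p =>
        obtain ⟨k', ng'⟩ := p
        rw [hs] at h
        cases h
        rw [scanB2_cons, if_neg h0, ih _ _ _ _ _ hs]
        simp only [Prod.mk.injEq]
        refine ⟨?_, by omega⟩
        by_cases hP : c = ')' ∧ pstep b c < 0 <;> cases neg <;> simp [hP]

theorem scanB2_of_scanSpec_none (xs : List Char) : ∀ b neg i, scanSpec xs b = none →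
    (scanB2 xs b neg i).2 = 0 := by
  induction xs with
  | nil => intro b neg i _; rfl
  | cons c t ih =>
    intro b neg i h
    rw [scanSpec_cons] at h
    by_cases h0 : pstep b c = 0
    · rw [if_pos h0] at h; cases h
    · rw [if_neg h0] at h
      cases hs : scanSpec t (pstep b c) with
      | none =>
        rw [scanB2_cons, if_neg h0]
        exact ih _ _ _ hs
      | some p => rw [hs] at h; obtain ⟨k', ng'⟩ := p; cases h

theorem check_alright_loop_eq_okA (xs : List Char) : ∀ m,
    check_alright_loop xs (List.replicate m '(') = okA xs m := by
  induction xs with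
  | nil => intro m; cases m <;> simp [check_alright_loop, okA, List.replicate_succ]
  | cons c t ih =>
    intro m
    rw [check_alright_loop]
    by_cases h1 : c = '('
    · subst h1
      simp only [Char.reduceEq, reduceIte]
      rw [← List.replicate_succ', ih (m + 1)]
      simp [okA]
    · by_cases h2 : c = ')'
      · subst h2
        simp only [Char.reduceEq, reduceIte]
        cases m with
        | zero => simp [okA]
        | succ s =>
          rw [List.replicate_succ', List.getLast?_concat]
          simp only [List.dropLast_concat]
          simp only [Char.reduceEq, reduceIte, ne_eq, not_true_eq_false]
          rw [ih s]
          simp [okA]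
      · simp only [if_neg h1, if_neg h2]
        rw [ih m]
        simp [okA, h1, h2]

theorem okA_take_eq_not_ng (xs : List Char) : ∀ (m : Nat) k ng,
    scanSpec xs (m : Int) = some (k, ng) → okA (xs.take k) m = !ng := by
  induction xs with
  | nil => intro m k ng h; simp [scanSpec] at h
  | cons c t ih =>
    intro m k ng h
    rw [scanSpec_cons] at h
    by_cases h0 : pstep (m : Int) c = 0
    · rw [if_pos h0] at h
      cases h
      by_cases h1 : c = '('
      · exfalso; subst h1; rw [show pstep (m : Int) '(' = (m : Int) + 1 from by
          simp only [pstep, Char.reduceEq, reduceIte]] at h0; omega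
      · by_cases h2 : c = ')'
        · subst h2
          rw [show pstep (m : Int) ')' = (m : Int) - 1 from by
            simp only [pstep, Char.reduceEq, reduceIte]] at h0
          have hm : m = 1 := by omega
          subst hm
          simp [okA]
        · rw [show pstep (m : Int) c = (m : Int) from by
            simp only [pstep, if_neg h1, if_neg h2]] at h0
          have hm : m = 0 := by omega
          subst hm
          simp [okA, h1, h2]
    · rw [if_neg h0] at h
      cases hs : scanSpec t (pstep (m : Int) c) with
      | none => rw [hs] at h; cases h
      | some p =>
        obtain ⟨k', ng'⟩ := p
        rw [hs] at h
        cases h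
        rw [List.take_succ_cons]
        by_cases h1 : c = '('
        · subst h1
          have hc : pstep (m : Int) '(' = ((m + 1 : Nat) : Int) := by
            simp only [pstep, Char.reduceEq, reduceIte]; omega
          rw [hc] at hs
          have hP : ¬ (pstep (m : Int) '(' < 0) := by rw [hc]; omega
          simp only [okA, Char.reduceEq, reduceIte]
          rw [ih (m + 1) k' ng' hs]
          cases ng' <;> simp [pstep] <;> omega
        · by_cases h2 : c = ')'
          · subst h2
            have hstep : pstep (m : Int) ')' = (m : Int) - 1 := by
              simp only [pstep, Char.reduceEq, reduceIte]
            cases m with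
            | zero =>
              simp only [okA, Char.reduceEq, reduceIte]
              simp [pstep]
            | succ s =>
              have hc : pstep ((s + 1 : Nat) : Int) ')' = ((s : Nat) : Int) := by
                rw [hstep]; omega
              rw [hc] at hs
              simp only [okA, Char.reduceEq, reduceIte]
              rw [ih s k' ng' hs]
              cases ng' <;> simp [pstep] <;> omega
          · have hc : pstep (m : Int) c = (m : Int) := by
              simp only [pstep, if_neg h1, if_neg h2]
            rw [hc] at hs
            simp only [okA, if_neg h1, if_neg h2]
            rw [ih m k' ng' hs]
            cases ng' <;> simp [pstep, h1, h2] <;> omega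

theorem refineLoop_eq_map (xs : List Char) :
    refineLoop xs = xs.map (fun c => if c = '(' then ')' else '(') := by
  induction xs with
  | nil => rfl
  | cons c t ih => simp [refineLoop, ih]

theorem refine_u_eq (u : List Char) (hu : 1 ≤ u.length) :
    refine_u u = (u.drop 1).dropLast.map (fun c => if c = '(' then ')' else '(') := by
  unfold refine_u
  rw [refineLoop_eq_map]
  congr 1
  have h1 : ((u.length : Int) - 1) = ((u.length - 1 : Nat) : Int) := by omega
  rw [h1, show (1 : Int) = ((1 : Nat) : Int) by norm_num, PySem.List.slice_natCast]
  rw [List.dropLast_eq_take, List.length_drop]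

theorem count_eq_of_pbal (w : List Char) (hb : pbal w = 0) : ¬ (w.count '(' ≠ w.count ')') := by
  rw [pbal_counts] at hb
  omega

theorem bLoop2_eq : ∀ (n : Nat) (w : List Char) (pos : Nat), w.length - pos ≤ n →
    pbal (w.drop pos) = 0 →
    ∀ (pre : List Char) (suf : List (List Char)),
      bLoop2 w pos pre suf = pre ++ recurCore (w.drop pos) ++ suf.reverse.flatten := by
  intro n
  induction n with
  | zero =>
    intro w pos hn hbal pre suf
    have hge : ¬ pos < w.length := by omega
    have hdrop : w.drop pos = [] := List.drop_eq_nil_of_le (by omega)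
    rw [bLoop2.eq_def, dif_neg hge, hdrop, recurCore.eq_def,
      show findLoop [] 1 = none from by rw [findLoop]; simp]
    simp
  | succ n ih =>
    intro w pos hn hbal pre suf
    by_cases hlt : pos < w.length
    · cases hs : scanSpec (w.drop pos) 0 with
      | none =>
        have hcut : (scanB2 (w.drop pos) 0 false pos).2 = 0 :=
          scanB2_of_scanSpec_none (w.drop pos) 0 false pos hs
        have hA : findLoop (w.drop pos) 1 = none := by
          have h := findLoop_eq_scanSpec (w.drop pos) hbal (w.drop pos).length 0 (by omega) (by omega)
          rw [List.drop_zero, List.take_zero, show pbal ([] : List Char) = 0 from rfl, hs] at h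
          simpa using h
        rw [bLoop2.eq_def, dif_pos hlt,
          show scanB2 (w.drop pos) 0 false pos = ((scanB2 (w.drop pos) 0 false pos).1, 0) from
            Prod.ext rfl hcut,
          recurCore.eq_def, hA]
        simp
      | some p =>
        obtain ⟨k, ng⟩ := p
        obtain ⟨hk1, hk2⟩ := scanSpec_bounds (w.drop pos) 0 k ng hs
        have hB : scanB2 (w.drop pos) 0 false pos = (ng, pos + k) := by
          have h := scanB2_of_scanSpec_some (w.drop pos) 0 false pos k ng hs
          simpa using h
        have hA : findLoop (w.drop pos) 1 = some k := by
          have h := findLoop_eq_scanSpec (w.drop pos) hbal (w.drop pos).length 0 (by omega) (by omega)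
          rw [List.drop_zero, List.take_zero, show pbal ([] : List Char) = 0 from rfl, hs] at h
          simpa using h
        have halr : check_alright ((w.drop pos).take k) = !ng := by
          have h1 := check_alright_loop_eq_okA ((w.drop pos).take k) 0
          have h2 := okA_take_eq_not_ng (w.drop pos) 0 k ng (by simpa using hs)
          unfold check_alright
          rw [show (List.replicate 0 '(') = ([] : List Char) from rfl] at h1
          rw [h1, h2]
        have htk : pbal ((w.drop pos).take k) = 0 := scanSpec_take (w.drop pos) 0 k ng hs
        have hdd : (w.drop pos).drop k = w.drop (pos + k) := by
          rw [List.drop_drop, Nat.add_comm]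
        have hbal' : pbal (w.drop (pos + k)) = 0 := by
          rw [← hdd]
          have := pbal_take_drop (w.drop pos) k
          omega
        have hlen : (w.drop pos).length = w.length - pos := List.length_drop ..
        have hn' : w.length - (pos + k) ≤ n := by omega
        have hslice : PySem.List.slice w (some (pos : Int)) (some ((pos + k : Nat) : Int)) =
            (w.drop pos).take k := by
          rw [PySem.List.slice_natCast]
          congr 1
          omega
        have hposk : pos < pos + k := by omega
        rw [bLoop2.eq_def, dif_pos hlt, hB]
        simp only [hposk, dite_true]
        rw [recurCore.eq_def, hA]
        simp only [PySem.List.slice_zero_start, PySem.List.slice_to_natCast,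
          PySem.List.slice_from_natCast]
        cases ng with
        | false =>
          simp only [halr, Bool.not_false, if_true]
          rw [ih w (pos + k) hn' hbal', hslice, hdd]
          simp [List.append_assoc]
        | true =>
          simp only [halr, Bool.not_true, Bool.false_eq_true, if_false]
          have hs2 : PySem.List.slice w (some ((pos + 1 : Nat) : Int))
              (some (((pos + k : Nat) : Int) - 1)) =
              (((w.drop pos).take k).drop 1).dropLast := by
            have he : (((pos + k : Nat) : Int) - 1) = ((pos + k - 1 : Nat) : Int) := by omega
            rw [he, PySem.List.slice_natCast, List.dropLast_eq_take,
              show ((((w.drop pos).take k).drop 1).length) = k - 1 by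
                simp only [List.length_drop, List.length_take]; omega,
              List.drop_take, List.take_take, List.drop_drop]
            congr 1
            all_goals omega
          rw [ih w (pos + k) hn' hbal',
            refine_u_eq _ (by simp only [List.length_take]; omega), hs2, hdd]
          simp [List.append_assoc]
    · have hdrop : w.drop pos = [] := List.drop_eq_nil_of_le (by omega)
      rw [bLoop2.eq_def, dif_neg hlt, hdrop, recurCore.eq_def,
        show findLoop [] 1 = none from by rw [findLoop]; simp]
      simp

-- ===== VERDICT (by name: the statement is the Claim_ definition above) =====
theorem recur_spec : Claim_equal_recur := by
  intro w _
  unfold Spec_recur recur recur_alt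
  by_cases hb : pbal w.toList = 0
  · rw [if_neg (count_eq_of_pbal w.toList hb),
      bLoop2_eq w.toList.length w.toList 0 (by omega) (by simpa using hb)]
    simp
  · have hA : findLoop w.toList 1 = none :=
      findLoop_none_of_unbalanced w.toList hb (w.toList.length + 1) 1 (by omega)
    rw [if_pos (by rw [pbal_counts] at hb; omega), recurCore.eq_def, hA]
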